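-- pv_equiv track=rewrite | github.com/Proyectos-cv/compilador-y-automatas | Compilador-iterativo/Unidad_6/Maquina_de_Turing.py | agregar_a_lista
-- ===== SOURCE A (Python) =====
-- def agregar_a_lista(cadena):
--     lista_resultado = []
--     for i in range (10):
--         if i<len(cadena):
--             lista_resultado.append(cadena[i])
--         else:
--             lista_resultado.insert(0, "B")
--     lista_resultado.insert(0, "B")
--     return lista_resultado
-- ===== SOURCE B (Python) =====
-- def agregar_a_lista(cadena):
--     m = min(len(cadena), 10)
--     return ["B"] * (11 - m) + list(cadena[:m])
-- ===== Notes on version B (the rewrite author's own statement) =====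
-- stated objective: simpler
-- what changed: Replaces the 10-iteration loop of appends and one-at-a-time inserts at position 0 (plus a final insert) with a single closed-form construction: a block of 11-min(len,10) 'B' markers followed by the first min(len,10) characters.
import Mathlib
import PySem

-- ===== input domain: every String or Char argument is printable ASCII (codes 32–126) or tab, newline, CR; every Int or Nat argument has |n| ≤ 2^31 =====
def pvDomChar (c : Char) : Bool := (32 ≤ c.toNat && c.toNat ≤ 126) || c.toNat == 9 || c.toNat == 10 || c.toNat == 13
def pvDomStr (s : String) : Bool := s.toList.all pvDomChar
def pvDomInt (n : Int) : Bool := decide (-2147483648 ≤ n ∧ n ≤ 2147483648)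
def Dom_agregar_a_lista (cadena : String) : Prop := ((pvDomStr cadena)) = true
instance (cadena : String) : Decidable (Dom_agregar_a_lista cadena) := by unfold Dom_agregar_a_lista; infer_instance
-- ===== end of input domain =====

-- B replaces A's loop (append chars, then insert 'B' at the front one at a time) with one
-- closed-form construction: a replicate of 'B's followed by the first min(len,10) characters.

-- ===== PORT A =====
-- the loop body: append cadena[i] while i < len(cadena), else insert 'B' at position 0
def pvStepA (cadena : String) (acc : List String) (i : Int) : List String :=
  if i < PySem.Str.len cadena then
    match PySem.Str.pyGet? cadena i with
    | some c => acc ++ [String.ofList [c]]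
    | none => acc          -- unreachable: i < len(cadena)
  else
    "B" :: acc             -- lista_resultado.insert(0, "B")

def agregar_a_lista (cadena : String) : List String :=
  "B" :: (PySem.List.pyRange 0 10 1).foldl (pvStepA cadena) []

-- ===== PORT B =====
def agregar_a_lista_alt (cadena : String) : List String :=
  let m := min cadena.toList.length 10
  List.replicate (11 - m) "B" ++ (cadena.toList.take m).map (fun c => String.ofList [c])

-- ===== PRECONDITION & SPEC =====
def Spec_agregar_a_lista (cadena : String) (out : List String) : Prop := out = agregar_a_lista_alt cadena
instance (cadena : String) (out : List String) : Decidable (Spec_agregar_a_lista cadena out) := by unfold Spec_agregar_a_lista; infer_instance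

-- ===== CLAIM (what is proved, stated in full; the proofs are below) =====
def Claim_equal_agregar_a_lista : Prop := ∀ (cadena : String), Dom_agregar_a_lista cadena → Spec_agregar_a_lista cadena (agregar_a_lista cadena)

-- ===== LEMMAS AND PROOFS =====

-- prepend phase: once i ≥ len(cadena), every remaining iteration prepends one "B"
theorem pvLoopB (cadena : String) (d : Nat) :
    ∀ (k : Nat) (acc : List String), 10 ≤ k + d → cadena.toList.length ≤ k →
      (PySem.List.pyRange (k : Int) 10 1).foldl (pvStepA cadena) acc
        = List.replicate (10 - k) "B" ++ acc := by
  induction d with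
  | zero =>
    intro k acc hk _
    rw [PySem.List.pyRange_one_eq_nil (by exact_mod_cast hk)]
    simp [Nat.sub_eq_zero_of_le (by omega : (10:Nat) ≤ k)]
  | succ d ih =>
    intro k acc hk hn
    by_cases h10 : 10 ≤ k
    · rw [PySem.List.pyRange_one_eq_nil (by exact_mod_cast h10)]
      simp [Nat.sub_eq_zero_of_le h10]
    · rw [PySem.List.pyRange_one_cons (by exact_mod_cast (by omega : k < 10))]
      have hstep : pvStepA cadena acc k = "B" :: acc := by
        unfold pvStepA
        rw [if_neg]
        simp [PySem.Str.len]
        exact_mod_cast hn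
      rw [List.foldl_cons, hstep]
      have : ((k : Int) + 1) = ((k + 1 : Nat) : Int) := by push_cast; ring
      rw [this, ih (k + 1) ("B" :: acc) (by omega) (by omega)]
      have h1 : 10 - k = (10 - (k + 1)) + 1 := by omega
      rw [h1, List.replicate_succ', List.append_assoc]
      rfl

-- append phase: while i < min(len,10) each iteration appends character i
theorem pvLoopA (cadena : String) (d : Nat) :
    ∀ (k : Nat) (acc : List String),
      min cadena.toList.length 10 ≤ k + d → k ≤ min cadena.toList.length 10 →
      (PySem.List.pyRange (k : Int) 10 1).foldl (pvStepA cadena) acc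
        = List.replicate (10 - min cadena.toList.length 10) "B" ++ acc
            ++ ((cadena.toList.drop k).take (min cadena.toList.length 10 - k)).map
                 (fun c => String.ofList [c]) := by
  set n := cadena.toList.length with hn
  set m := min n 10 with hm
  induction d with
  | zero =>
    intro k acc hk hkm
    have hkm' : k = m := by omega
    subst hkm'
    simp only [Nat.sub_self, List.take_zero, List.map_nil, List.append_nil]
    by_cases hcase : n ≤ m
    · rw [pvLoopB cadena 10 m acc (by omega) hcase]
    · have h10 : m = 10 := by omega
      rw [h10]
      rw [PySem.List.pyRange_one_eq_nil (by norm_num)]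
      simp
  | succ d ih =>
    intro k acc hk hkm
    by_cases heq : m ≤ k
    · exact ih k acc (by omega) (by omega)
    · have hklt : k < m := by omega
      have hkn : k < n := by omega
      rw [PySem.List.pyRange_one_cons (by exact_mod_cast (by omega : k < 10))]
      have hget : PySem.Str.pyGet? cadena (k : Int) = some (cadena.toList[k]'hkn) := by
        simp [List.getElem?_eq_getElem hkn]
      have hstep : pvStepA cadena acc k = acc ++ [String.ofList [cadena.toList[k]'hkn]] := by
        unfold pvStepA
        rw [if_pos]
        · rw [hget]
        · simp [PySem.Str.len]; exact_mod_cast hkn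
      rw [List.foldl_cons, hstep]
      have hcast : ((k : Int) + 1) = ((k + 1 : Nat) : Int) := by push_cast; ring
      rw [hcast, ih (k + 1) _ (by omega) (by omega)]
      have hdrop : cadena.toList.drop k = cadena.toList[k]'hkn :: cadena.toList.drop (k + 1) :=
        (List.getElem_cons_drop hkn).symm
      have htake : (cadena.toList.drop k).take (m - k)
          = cadena.toList[k]'hkn :: (cadena.toList.drop (k + 1)).take (m - (k + 1)) := by
        rw [hdrop, show m - k = (m - (k + 1)) + 1 by omega, List.take_succ_cons]
      rw [htake]
      simp

-- ===== VERDICT (by name: the statement is the Claim_ definition above) =====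
theorem agregar_a_lista_spec : Claim_equal_agregar_a_lista := by
  intro cadena _
  unfold Spec_agregar_a_lista agregar_a_lista agregar_a_lista_alt
  have h := pvLoopA cadena 10 0 [] (by omega) (by omega)
  simp only [Nat.cast_zero, List.drop_zero, Nat.sub_zero] at h
  rw [h]
  show _ = List.replicate (11 - min cadena.toList.length 10) "B"
             ++ (cadena.toList.take (min cadena.toList.length 10)).map (fun c => String.ofList [c])
  rw [show 11 - min cadena.toList.length 10 = (10 - min cadena.toList.length 10) + 1 from by omega,
      List.replicate_succ]
  simp
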